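-- pv_equiv track=rewrite | github.com/tlijkkkk/mark_v | leetcode-practice/leetcode_practice/data_structure/dict/leetcode3557_find_max_num_non_intersecting_substrings.py | find_max_num_non_intersecting_substrings
-- ===== SOURCE A (Python) =====
-- def find_max_num_non_intersecting_substrings(word: str) -> int:
--     max_num = 0
--
--     char_open_idx: Dict[str, int] = {}
--
--     for i in range(len(word)):
--         if word[i] not in char_open_idx:
--             char_open_idx[word[i]] = i
--         elif i - char_open_idx[word[i]] + 1 >= 4:
--             max_num += 1
--             char_open_idx.clear()
--
--     return max_num
-- ===== SOURCE B (Python) =====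
-- def find_max_num_non_intersecting_substrings(word: str) -> int:
--     # Two staged passes. Pass 1 precomputes m[j] = the largest index i <= j - 3
--     # with word[i] == word[j] (or -1), via a 3-lagged last-occurrence dict.
--     # Pass 2 is a dict-free greedy: a window starting at `start` closes at the
--     # first j with m[j] >= start (some equal character at distance >= 3 lies in
--     # the window), then start jumps to j + 1.
--     n = len(word)
--     m = [-1] * n
--     last = {}
--     for j in range(n):
--         if j >= 3:
--             last[word[j - 3]] = j - 3
--         m[j] = last.get(word[j], -1)
--     count = 0
--     start = 0
--     for j in range(n):
--         if m[j] >= start: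
--             count += 1
--             start = j + 1
--     return count
-- ===== Notes on version B (the rewrite author's own statement) =====
-- stated objective: alternative
-- what changed: Splits A's single stateful pass into two staged passes: pass 1 precomputes, via a 3-lagged last-occurrence dict, m[j] = the largest index i <= j-3 with word[i] == word[j] (or -1); pass 2 is a dict-free greedy over the integer array m, closing a window at j exactly when m[j] >= start and jumping start to j+1.
import Mathlib
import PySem

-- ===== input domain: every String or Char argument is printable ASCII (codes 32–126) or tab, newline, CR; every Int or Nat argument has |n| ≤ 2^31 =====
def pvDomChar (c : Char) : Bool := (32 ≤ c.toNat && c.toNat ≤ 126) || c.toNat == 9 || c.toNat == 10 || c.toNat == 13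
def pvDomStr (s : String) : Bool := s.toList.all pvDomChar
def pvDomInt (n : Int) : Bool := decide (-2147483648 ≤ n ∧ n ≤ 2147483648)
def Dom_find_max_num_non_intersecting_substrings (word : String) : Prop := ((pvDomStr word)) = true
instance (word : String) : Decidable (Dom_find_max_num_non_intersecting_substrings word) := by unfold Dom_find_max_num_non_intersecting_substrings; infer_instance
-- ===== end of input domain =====

-- B replaces A's single stateful dict pass by two staged passes: pass 1 precomputes
-- m[j] = largest index i ≤ j-3 with word[i] = word[j] (else -1) via a 3-lagged
-- last-occurrence dict; pass 2 is a dict-free greedy over the integer array m.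

-- ===== PORT A =====
-- A's loop: for i over the word, record first occurrence of each char in the dict;
-- on a repeat whose window length i - first + 1 >= 4, count one and clear the dict.
def pvLoopA : List Char → Nat → PySem.Dict Char Int → Int → Int
  | [], _, _, max_num => max_num
  | x :: xs, i, d, max_num =>
    match d.get? x with
    | none => pvLoopA xs (i + 1) (d.insert x (i : Int)) max_num
    | some j =>
      if (i : Int) - j + 1 ≥ 4 then
        pvLoopA xs (i + 1) PySem.Dict.empty (max_num + 1)
      else
        pvLoopA xs (i + 1) d max_num

def find_max_num_non_intersecting_substrings (word : String) : Int :=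
  pvLoopA word.toList 0 PySem.Dict.empty 0

-- ===== PORT B =====
-- Pass 1 of Source B: for j, if j >= 3 then last[word[j-3]] = j-3; m[j] = last.get(word[j], -1).
def pvBuildM (full : List Char) : List Char → Nat → PySem.Dict Char Int → List Int
  | [], _, _ => []
  | x :: xs, j, last =>
    let last' := if 3 ≤ j then last.insert (full.getD (j - 3) x) ((j : Int) - 3) else last
    last'.getD x (-1) :: pvBuildM full xs (j + 1) last'

-- Pass 2 of Source B: greedy over m; close at j iff m[j] >= start, then start = j+1.
def pvGreedy : List Int → Nat → Nat → Int → Int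
  | [], _, _, count => count
  | m :: ms, j, start, count =>
    if (start : Int) ≤ m then pvGreedy ms (j + 1) (j + 1) (count + 1)
    else pvGreedy ms (j + 1) start count

def find_max_num_non_intersecting_substrings_alt (word : String) : Int :=
  pvGreedy (pvBuildM word.toList word.toList 0 PySem.Dict.empty) 0 0 0

-- ===== PRECONDITION & SPEC =====
def Spec_find_max_num_non_intersecting_substrings (word : String) (out : Int) : Prop := out = find_max_num_non_intersecting_substrings_alt word
instance (word : String) (out : Int) : Decidable (Spec_find_max_num_non_intersecting_substrings word out) := by unfold Spec_find_max_num_non_intersecting_substrings; infer_instance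

-- ===== CLAIM (what is proved, stated in full; the proofs are below) =====
def Claim_equal_find_max_num_non_intersecting_substrings : Prop := ∀ (word : String), Dom_find_max_num_non_intersecting_substrings word → Spec_find_max_num_non_intersecting_substrings word (find_max_num_non_intersecting_substrings word)

-- ===== LEMMAS AND PROOFS =====

-- first occurrence index of ch in s, positions counted from st
def pvFirstOcc : List Char → Char → Int → Option Int
  | [], _, _ => none
  | y :: ys, ch, st => if y = ch then some st else pvFirstOcc ys ch (st + 1)

lemma pvFirstOcc_none_iff (s : List Char) (ch : Char) : ∀ st : Int,
    pvFirstOcc s ch st = none ↔ ch ∉ s := by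
  induction s with
  | nil => simp [pvFirstOcc]
  | cons y ys ih =>
    intro st
    by_cases h : y = ch
    · simp [pvFirstOcc, h]
    · simp only [pvFirstOcc, h, if_false, ih, List.mem_cons, not_or]
      simp [Ne.symm h]

lemma pvFirstOcc_append_of_none {s : List Char} {ch : Char} {st : Int}
    (h : pvFirstOcc s ch st = none) (t : List Char) :
    pvFirstOcc (s ++ t) ch st = pvFirstOcc t ch (st + s.length) := by
  induction s generalizing st with
  | nil => simp
  | cons y ys ih =>
    by_cases hy : y = ch
    · simp [pvFirstOcc, hy] at h
    · simp only [pvFirstOcc, hy, if_false] at h ⊢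
      rw [List.cons_append]
      simp only [pvFirstOcc, hy, if_false]
      rw [ih h]
      congr 1
      simp only [List.length_cons]
      push_cast
      omega

lemma pvFirstOcc_append_of_some {s : List Char} {ch : Char} {st j : Int}
    (h : pvFirstOcc s ch st = some j) (t : List Char) :
    pvFirstOcc (s ++ t) ch st = some j := by
  induction s generalizing st with
  | nil => simp [pvFirstOcc] at h
  | cons y ys ih =>
    by_cases hy : y = ch
    · simp only [pvFirstOcc, hy, if_true] at h
      simp [pvFirstOcc, hy, h]
    · simp only [pvFirstOcc, hy, if_false] at h
      rw [List.cons_append]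
      simp only [pvFirstOcc, hy, if_false]
      exact ih h

lemma pvFirstOcc_some_spec {s : List Char} {ch : Char} {st j : Int}
    (h : pvFirstOcc s ch st = some j) :
    ∃ k : Nat, j = st + k ∧ (∃ hk : k < s.length, s[k] = ch) ∧
      (∀ m : Nat, (hm : m < s.length) → s[m] = ch → k ≤ m) := by
  induction s generalizing st j with
  | nil => simp [pvFirstOcc] at h
  | cons y ys ih =>
    by_cases hy : y = ch
    · simp only [pvFirstOcc, hy, if_true, Option.some.injEq] at h
      exact ⟨0, by omega, ⟨by simp, by simpa using hy⟩, fun m hm _ => Nat.zero_le m⟩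
    · simp only [pvFirstOcc, hy, if_false] at h
      obtain ⟨k, hk1, ⟨hk2, hk3⟩, hk4⟩ := ih h
      refine ⟨k + 1, by omega, ⟨by simpa using hk2, by simpa using hk3⟩, ?_⟩
      intro m hm hme
      cases m with
      | zero => simp at hme; exact absurd hme hy
      | succ m' =>
        have := hk4 m' (by simpa using hm) (by simpa using hme)
        omega

-- last occurrence index of ch in s, positions counted from k
def pvLastIdx : List Char → Char → Nat → Option Nat
  | [], _, _ => none
  | y :: ys, ch, k =>
    match pvLastIdx ys ch (k + 1) with
    | some r => some r
    | none => if y = ch then some k else none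

lemma pvLastIdx_none_iff (s : List Char) (ch : Char) : ∀ k : Nat,
    pvLastIdx s ch k = none ↔ ch ∉ s := by
  induction s with
  | nil => simp [pvLastIdx]
  | cons y ys ih =>
    intro k
    rw [pvLastIdx]
    cases hr : pvLastIdx ys ch (k + 1) with
    | some r =>
      simp only []
      constructor
      · intro h; exact absurd h (by simp)
      · intro h
        exact absurd ((ih (k + 1)).2 (fun hm => h (List.mem_cons_of_mem _ hm))) (by simp [hr])
    | none =>
      by_cases hy : y = ch
      · simp [hy]
      · simp [hy, (ih (k + 1)).1 hr, Ne.symm hy]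

lemma pvLastIdx_append_single (s : List Char) (y ch : Char) : ∀ k : Nat,
    pvLastIdx (s ++ [y]) ch k = if y = ch then some (k + s.length) else pvLastIdx s ch k := by
  induction s with
  | nil => intro k; by_cases hy : y = ch <;> simp [pvLastIdx, hy]
  | cons z zs ih =>
    intro k
    rw [List.cons_append, pvLastIdx, ih (k + 1)]
    by_cases hy : y = ch
    · simp only [hy, if_true]
      show some (k + 1 + zs.length) = some (k + (z :: zs).length)
      simp only [Option.some.injEq, List.length_cons]
      omega
    · simp only [hy, if_false]
      conv_rhs => rw [pvLastIdx]

lemma pvLastIdx_some_spec {s : List Char} {ch : Char} {k r : Nat}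
    (h : pvLastIdx s ch k = some r) :
    ∃ i : Nat, r = k + i ∧ (∃ hi : i < s.length, s[i] = ch) ∧
      (∀ m : Nat, (hm : m < s.length) → s[m] = ch → m ≤ i) := by
  induction s generalizing k r with
  | nil => simp [pvLastIdx] at h
  | cons y ys ih =>
    rw [pvLastIdx] at h
    cases hr : pvLastIdx ys ch (k + 1) with
    | some r' =>
      rw [hr] at h
      simp only [Option.some.injEq] at h
      subst h
      obtain ⟨i, hi1, ⟨hi2, hi3⟩, hi4⟩ := ih hr
      refine ⟨i + 1, by omega, ⟨by simpa using hi2, by simpa using hi3⟩, ?_⟩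
      intro m hm hme
      cases m with
      | zero => omega
      | succ m' =>
        have := hi4 m' (by simpa using hm) (by simpa using hme)
        omega
    | none =>
      rw [hr] at h
      by_cases hy : y = ch
      · simp only [hy, if_true, Option.some.injEq] at h
        subst h
        refine ⟨0, by omega, ⟨by simp, by simpa using hy⟩, ?_⟩
        intro m hm hme
        cases m with
        | zero => omega
        | succ m' =>
          have hnot := (pvLastIdx_none_iff ys ch (k + 1)).1 hr
          exact absurd (by rw [← hme]; exact List.getElem_mem _) hnot
      · simp [hy] at h

-- cast an optional Nat index to an optional Int (kept as a named def so goals stay readable)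
def pvToInt : Option Nat → Option Int
  | none => none
  | some r => some ((r : Int))

-- the semantic closing condition at position j for a window starting at start
def pvE (full : List Char) (start j : Nat) (x : Char) : Prop :=
  ∃ i : Nat, start ≤ i ∧ i + 3 ≤ j ∧ ∃ hi : i < full.length, full[i] = x

-- the value produced by pass 1 at position j, given the lag-dict invariant, decides pvE
lemma pvCondB_iff (full : List Char) (start j : Nat) (x : Char) (hj : j < full.length)
    (last' : PySem.Dict Char Int)
    (hlast' : ∀ ch, last'.get? ch = pvToInt (pvLastIdx (full.take (j + 1 - 3)) ch 0)) :
    ((start : Int) ≤ last'.getD x (-1)) ↔ pvE full start j x := by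
  rw [PySem.Dict.getD_eq_get?_getD, hlast' x]
  have hlen : (full.take (j + 1 - 3)).length = j + 1 - 3 := by
    rw [List.length_take]; omega
  cases hocc : pvLastIdx (full.take (j + 1 - 3)) x 0 with
  | none =>
    simp only [pvToInt, Option.getD_none]
    constructor
    · intro h; omega
    · rintro ⟨i, hi1, hi2, hi3, hi4⟩
      have hnot := (pvLastIdx_none_iff _ x 0).1 hocc
      have hmem : x ∈ full.take (j + 1 - 3) := by
        have hilt : i < j + 1 - 3 := by omega
        have : (full.take (j + 1 - 3))[i]'(by omega) = x := by
          rw [List.getElem_take]; exact hi4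
        rw [← this]; exact List.getElem_mem _
      exact absurd hmem hnot
  | some r =>
    simp only [pvToInt, Option.getD_some]
    obtain ⟨i, hi1, ⟨hi2, hi3⟩, hi4⟩ := pvLastIdx_some_spec hocc
    constructor
    · intro h
      refine ⟨i, by omega, by omega, by omega, ?_⟩
      simp only [List.getElem_take] at hi3
      exact hi3
    · rintro ⟨i', hi'1, hi'2, hi'3, hi'4⟩
      have hilt : i' < (full.take (j + 1 - 3)).length := by omega
      have hx : (full.take (j + 1 - 3))[i']'hilt = x := by
        rw [List.getElem_take]; exact hi'4
      have hle := hi4 i' hilt hx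
      omega

-- A's dict of first occurrences decides pvE too
lemma pvCondA_iff (full seg : List Char) (xs : List Char) (start : Nat) (x : Char)
    (hdrop : full.drop start = seg ++ x :: xs) :
    (∃ f : Int, pvFirstOcc seg x (start : Int) = some f ∧
        ((start + seg.length : Nat) : Int) - f + 1 ≥ 4) ↔
      pvE full start (start + seg.length) x := by
  have hlen : start + seg.length + xs.length + 1 = full.length := by
    have := congrArg List.length hdrop
    simp [List.length_drop] at this
    omega
  have hseg : ∀ (k : Nat) (hk : k < seg.length),
      full[start + k]'(by omega) = seg[k] := by
    intro k hk
    have h1 : (full.drop start)[k]'(by simp only [List.length_drop]; omega)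
        = full[start + k]'(by omega) := List.getElem_drop ..
    have h2 : (full.drop start)[k]'(by simp only [List.length_drop]; omega)
        = (seg ++ x :: xs)[k]'(by simp only [List.length_append, List.length_cons]; omega) :=
      List.getElem_of_eq hdrop _
    rw [← h1, h2, List.getElem_append_left hk]
  constructor
  · rintro ⟨f, hf, hbig⟩
    obtain ⟨k, hk1, ⟨hk2, hk3⟩, _⟩ := pvFirstOcc_some_spec hf
    refine ⟨start + k, by omega, by omega, by omega, ?_⟩
    rw [hseg k hk2]; exact hk3
  · rintro ⟨i, hi1, hi2, hi3, hi4⟩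
    have hk : i - start < seg.length := by omega
    have hmem : x ∈ seg := by
      have : seg[i - start]'hk = x := by
        rw [← hseg (i - start) hk]
        have : start + (i - start) = i := by omega
        simp only [this]
        exact hi4
      rw [← this]; exact List.getElem_mem _
    cases hf : pvFirstOcc seg x (start : Int) with
    | none => exact absurd ((pvFirstOcc_none_iff seg x (start : Int)).1 hf) (by simpa using hmem)
    | some f =>
      obtain ⟨k, hk1, _, hk4⟩ := pvFirstOcc_some_spec hf
      have hkmin := hk4 (i - start) hk (by
        rw [← hseg (i - start) hk]
        have : start + (i - start) = i := by omega
        simp only [this]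
        exact hi4)
      exact ⟨f, rfl, by omega⟩

-- the lag-dict invariant is preserved by one step of pass 1
lemma pvLagStep (full : List Char) (j : Nat) (hj : j < full.length) (x : Char)
    (last : PySem.Dict Char Int)
    (hlast : ∀ ch, last.get? ch = pvToInt (pvLastIdx (full.take (j - 3)) ch 0)) :
    ∀ ch, (if 3 ≤ j then last.insert (full.getD (j - 3) x) ((j : Int) - 3) else last).get? ch
      = pvToInt (pvLastIdx (full.take (j + 1 - 3)) ch 0) := by
  intro ch
  by_cases h3 : 3 ≤ j
  · have hjl : j - 3 < full.length := by omega
    have hkey : full.getD (j - 3) x = full[j - 3] := by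
      rw [List.getD_eq_getElem?_getD, List.getElem?_eq_getElem hjl]
      rfl
    have htake : full.take (j + 1 - 3) = full.take (j - 3) ++ [full[j - 3]] := by
      have : j + 1 - 3 = (j - 3) + 1 := by omega
      rw [this, List.take_add_one, List.getElem?_eq_getElem hjl]
      rfl
    rw [if_pos h3, htake, pvLastIdx_append_single]
    by_cases hch : ch = full[j - 3]
    · rw [hch, hkey, PySem.Dict.get?_insert_self, if_pos rfl]
      have : (full.take (j - 3)).length = j - 3 := by rw [List.length_take]; omega
      rw [this]
      simp only [pvToInt, Option.some.injEq]
      omega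
    · rw [hkey, PySem.Dict.get?_insert_of_ne _ _ hch, if_neg (fun h => hch h.symm), hlast ch]
  · have : j + 1 - 3 = j - 3 := by omega
    rw [if_neg h3, this, hlast ch]

-- main synchronisation: A's loop equals pass 2 over what pass 1 still has to produce
lemma pvKey (full : List Char) (xs : List Char) : ∀ (seg : List Char) (start : Nat)
    (d last : PySem.Dict Char Int) (c : Int),
    full.drop start = seg ++ xs →
    (∀ ch, d.get? ch = pvFirstOcc seg ch (start : Int)) →
    (∀ ch, last.get? ch = pvToInt (pvLastIdx (full.take (start + seg.length - 3)) ch 0)) →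
    pvLoopA xs (start + seg.length) d c
      = pvGreedy (pvBuildM full xs (start + seg.length) last) (start + seg.length) start c := by
  induction xs with
  | nil => intro seg start d last c _ _ _; simp [pvLoopA, pvBuildM, pvGreedy]
  | cons x xs ih =>
    intro seg start d last c hdrop hd hlast
    set j := start + seg.length with hj
    have hjlt : j < full.length := by
      have := congrArg List.length hdrop
      simp [List.length_drop] at this
      omega
    rw [pvLoopA, pvBuildM]
    set last' := if 3 ≤ j then last.insert (full.getD (j - 3) x) ((j : Int) - 3) else last with hl'
    have hlast' := pvLagStep full j hjlt x last hlast
    rw [pvGreedy]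
    have hcondB := pvCondB_iff full start j x hjlt last' (by rw [hl']; exact hlast')
    have hcondA := pvCondA_iff full seg xs start x hdrop
    cases hget : d.get? x with
    | none =>
      have hnotin : x ∉ seg := (pvFirstOcc_none_iff seg x (start : Int)).1 (by rw [← hd x, hget])
      have hnE : ¬ pvE full start j x := by
        intro hE
        obtain ⟨f, hf, _⟩ := hcondA.2 hE
        rw [← hd x, hget] at hf
        exact absurd hf (by simp)
      simp only [if_neg (show ¬ (start : Int) ≤ last'.getD x (-1) from fun h => hnE (hcondB.1 h))]
      have hlen : j + 1 = start + (seg ++ [x]).length := by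
        simp only [List.length_append, List.length_cons, List.length_nil, hj]; omega
      rw [hlen]
      apply ih (seg ++ [x]) start
      · rw [hdrop]; simp
      · intro ch
        by_cases hch : ch = x
        · subst hch
          rw [PySem.Dict.get?_insert_self,
              pvFirstOcc_append_of_none (by rw [← hd ch]; exact hget) [ch]]
          have : pvFirstOcc [ch] ch ((start : Int) + (seg.length : Int)) = some ((start : Int) + (seg.length : Int)) := by
            simp [pvFirstOcc]
          rw [this]
          simp only [Option.some.injEq]
          omega
        · rw [PySem.Dict.get?_insert_of_ne _ _ hch, hd ch]
          cases hf : pvFirstOcc seg ch (start : Int) with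
          | none =>
            rw [pvFirstOcc_append_of_none hf [x]]
            simp [pvFirstOcc, Ne.symm hch]
          | some j' => rw [pvFirstOcc_append_of_some hf [x]]
      · intro ch
        rw [← hlen]
        exact hlast' ch
    | some f =>
      by_cases hA : (j : Int) - f + 1 ≥ 4
      · -- close the window
        have hE : pvE full start j x := hcondA.1 ⟨f, by rw [← hd x, hget], hA⟩
        simp only [if_pos hA, if_pos (hcondB.2 hE)]
        have hlen : j + 1 = (j + 1) + ([] : List Char).length := by simp
        rw [hlen]
        apply ih [] (j + 1)
        · have : full.drop (start + (seg.length + 1)) = ((seg ++ x :: xs).drop (seg.length + 1)) := by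
            rw [← hdrop, List.drop_drop]
          simpa [hj, Nat.add_comm, Nat.add_assoc, Nat.add_left_comm] using this
        · intro ch; simp [pvFirstOcc, PySem.Dict.get?_empty]
        · intro ch
          have : j + 1 + ([] : List Char).length - 3 = j + 1 - 3 := by simp
          rw [this]
          exact hlast' ch
      · -- no close
        have hnE : ¬ pvE full start j x := by
          intro hE
          obtain ⟨f', hf', hbig⟩ := hcondA.2 hE
          rw [← hd x, hget] at hf'
          have hff : f = f' := Option.some.inj hf'
          omega
        simp only [if_neg hA, if_neg (show ¬ (start : Int) ≤ last'.getD x (-1) from fun h => hnE (hcondB.1 h))]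
        have hlen : j + 1 = start + (seg ++ [x]).length := by
          simp only [List.length_append, List.length_cons, List.length_nil, hj]; omega
        rw [hlen]
        apply ih (seg ++ [x]) start
        · rw [hdrop]; simp
        · intro ch
          by_cases hch : ch = x
          · subst hch
            rw [hget, pvFirstOcc_append_of_some (by rw [← hd ch]; exact hget) [ch]]
          · rw [hd ch]
            cases hf : pvFirstOcc seg ch (start : Int) with
            | none =>
              rw [pvFirstOcc_append_of_none hf [x]]
              simp [pvFirstOcc, Ne.symm hch]
            | some j' => rw [pvFirstOcc_append_of_some hf [x]]
        · intro ch
          rw [← hlen]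
          exact hlast' ch

-- ===== VERDICT (by name: the statement is the Claim_ definition above) =====
theorem find_max_num_non_intersecting_substrings_spec : Claim_equal_find_max_num_non_intersecting_substrings := by
  intro word _
  unfold Spec_find_max_num_non_intersecting_substrings
  unfold find_max_num_non_intersecting_substrings find_max_num_non_intersecting_substrings_alt
  have := pvKey word.toList word.toList [] 0 PySem.Dict.empty PySem.Dict.empty 0 (by simp)
    (fun ch => by simp [pvFirstOcc, PySem.Dict.get?_empty])
    (fun ch => by simp [pvLastIdx, pvToInt, PySem.Dict.get?_empty])
  simpa using this
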